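-- pv_equiv track=rewrite | github.com/prashant97sikarwar/data-structure-and-algorithms | Bitwise Algorithms/sum_of_bitwiseAndOf_all_subsets.py | check
-- ===== SOURCE A (Python) =====
-- def check(arr,n):
--     ans = 0
--     for i in range(32):
--         count = 0
--         for j in range(n):
--             if (arr[j] & (1<<i)):
--                 count += 1
--         subset = (1 << count) - 1
--         subset = subset * (1 << i)
--         ans += subset
--     return ans%1000000007
-- ===== SOURCE B (Python) =====
-- def check(arr, n):
--     # Incremental subset-doubling, reduced modulo 1000000007 as we go: when an
--     # element whose bit i is set arrives after c earlier elements with bit i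
--     # set, exactly 2**c new subsets gain bit i in their AND (that element with
--     # any subset of those c), contributing 2**c << i.  One pass over the
--     # elements accumulates the answer directly from per-bit running powers;
--     # no counting pass and no closed-form (2**c - 1) term.
--     MOD = 1000000007
--     pow2 = [1] * 32
--     ans = 0
--     for j in range(n):
--         y = arr[j] & 0xFFFFFFFF
--         i = 0
--         while y:
--             if y & 1:
--                 ans = (ans + (pow2[i] << i)) % MOD
--                 pow2[i] = pow2[i] * 2 % MOD
--             y >>= 1
--             i += 1
--     return ans
-- ===== Notes on version B (the rewrite author's own statement) =====
-- stated objective: alternative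
-- what changed: A counts, per bit position, how many elements set that bit (32 array passes) and then applies the closed form (2^count-1)<<i before a final mod; B never counts: it makes one pass over the elements and accumulates the answer incrementally by the subset-doubling argument (an element with bit i set arriving after c earlier such elements contributes 2^c<<i new subset-ANDs), keeping per-bit running powers and reducing mod 1000000007 as it goes.
import Mathlib
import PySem

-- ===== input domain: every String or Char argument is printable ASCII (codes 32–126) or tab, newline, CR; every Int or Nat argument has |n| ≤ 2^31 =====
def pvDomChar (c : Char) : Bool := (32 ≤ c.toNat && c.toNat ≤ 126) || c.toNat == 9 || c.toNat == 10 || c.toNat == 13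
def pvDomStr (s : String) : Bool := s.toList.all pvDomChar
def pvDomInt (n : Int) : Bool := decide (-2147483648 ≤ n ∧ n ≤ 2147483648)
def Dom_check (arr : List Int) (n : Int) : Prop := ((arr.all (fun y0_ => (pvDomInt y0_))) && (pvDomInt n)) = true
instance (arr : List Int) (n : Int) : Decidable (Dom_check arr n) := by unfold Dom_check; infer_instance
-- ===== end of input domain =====

-- B replaces A's per-bit counting passes + closed-form (2^count-1)<<i by a single pass that
-- accumulates the answer incrementally (subset doubling), keeping per-bit running powers and
-- reducing mod 1000000007 as it goes (objective: alternative algorithm, similar cost).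

-- ===== PORT A =====
-- arr[j] is PySem.List.pyGetD with default 0: inside Pre_check every j ∈ range(n) is in range,
-- so the default is never consulted.  count and i are always ≥ 0, so .toNat in the shifts is exact.
def check (arr : List Int) (n : Int) : Int :=
  let ans : Int := (PySem.List.pyRange 0 32).foldl (fun ans i =>
    let count : Int := (PySem.List.pyRange 0 n).foldl (fun count j =>
      if PySem.Int.band (PySem.List.pyGetD arr j 0) ((1:Int) <<< i.toNat) ≠ 0
      then count + 1 else count) 0
    let subset := ((1:Int) <<< count.toNat) - 1
    let subset := subset * ((1:Int) <<< i.toNat)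
    ans + subset) 0
  PySem.Int.mod ans 1000000007

-- ===== PORT B =====
-- the `while y:` loop of Source B on the state (ans, pow2); y = arr[j] & 0xFFFFFFFF is ≥ 0, so it is
-- carried as a Nat (exact); pow2[i] updates are List.set/getD (i ≤ 31 whenever a bit is set).
def bitStep (y : Nat) (i : Nat) (ans : Int) (pows : List Int) : Int × List Int :=
  if y = 0 then (ans, pows)
  else
    bitStep (y >>> 1) (i + 1)
      (if y &&& 1 = 1 then PySem.Int.mod (ans + ((pows.getD i 0) <<< i : Int)) 1000000007 else ans)
      (if y &&& 1 = 1 then pows.set i (PySem.Int.mod ((pows.getD i 0) * 2) 1000000007) else pows)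
termination_by y
decreasing_by simp [Nat.shiftRight_one]; omega

def check_alt (arr : List Int) (n : Int) : Int :=
  let st : Int × List Int := (PySem.List.pyRange 0 n).foldl (fun st j =>
    bitStep (PySem.Int.band (PySem.List.pyGetD arr j 0) 0xFFFFFFFF).toNat 0 st.1 st.2)
    (0, List.replicate 32 1)
  st.1

-- ===== PRECONDITION & SPEC =====
-- Python A (and B) raise IndexError when n > len(arr); nothing else raises.
def Pre_check (arr : List Int) (n : Int) : Prop := n ≤ (arr.length : Int)
instance (arr : List Int) (n : Int) : Decidable (Pre_check arr n) := by unfold Pre_check; infer_instance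
def pvWitness_check : List Int × Int := ([5, -3, 7], 3)

def Spec_check (arr : List Int) (n : Int) (out : Int) : Prop := out = check_alt arr n
instance (arr : List Int) (n : Int) (out : Int) : Decidable (Spec_check arr n out) := by unfold Spec_check; infer_instance

-- ===== CLAIM (what is proved, stated in full; the proofs are below) =====
def Claim_equal_check : Prop := ∀ (arr : List Int) (n : Int), Dom_check arr n → Pre_check arr n → Spec_check arr n (check arr n)

-- ===== LEMMAS AND PROOFS =====

-- A's inner loop is a countP.
theorem foldA_countP (arr : List Int) (v : Int) : ∀ (l : List Int) (c : Int),
    l.foldl (fun count j =>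
        if PySem.Int.band (PySem.List.pyGetD arr j 0) v ≠ 0 then count + 1 else count) c
      = c + (l.countP (fun j => decide (PySem.Int.band (PySem.List.pyGetD arr j 0) v ≠ 0)) : Nat) := by
  intro l
  induction l with
  | nil => intro c; simp
  | cons x l ih =>
      intro c
      by_cases h : PySem.Int.band (PySem.List.pyGetD arr x 0) v ≠ 0
      · rw [List.foldl_cons, if_pos h, ih, List.countP_cons]
        simp only [h, decide_not, ne_eq]
        push_cast
        simp
        ring
      · rw [List.foldl_cons, if_neg h, ih, List.countP_cons]
        simp only [ne_eq, not_not] at h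
        simp [h]

-- The modulus is positive, so Python's % is Int.emod here.
theorem pmod (a : Int) : PySem.Int.mod a 1000000007 = a % 1000000007 :=
  PySem.Int.mod_eq_emod_of_pos (by norm_num)

-- (x ≡ x' mod p) is preserved by a common right factor.
theorem hswap (x x' m : Int) (h : x % 1000000007 = x' % 1000000007) :
    (x * m) % 1000000007 = (x' * m) % 1000000007 := by
  rw [Int.mul_emod, h, ← Int.mul_emod]

theorem bitStep_length : ∀ (y b : Nat) (a : Int) (pows : List Int),
    (bitStep y b a pows).2.length = pows.length := by
  intro y
  induction y using Nat.strong_induction_on with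
  | _ y ih =>
    intro b a pows
    rw [bitStep]
    by_cases h0 : y = 0
    · simp [h0]
    · have hlt : y >>> 1 < y := by simp [Nat.shiftRight_one]; omega
      simp only [h0, if_false]
      rw [ih _ hlt]
      split <;> simp

-- Effect of one `while y:` loop on entry k of the power table (mod p).
theorem bitStep_snd_getD : ∀ (y b : Nat) (a : Int) (pows : List Int) (k : Nat), k < pows.length →
    (bitStep y b a pows).2.getD k 0 % 1000000007
      = (pows.getD k 0 * (if b ≤ k ∧ y.testBit (k - b) then 2 else 1)) % 1000000007 := by
  intro y
  induction y using Nat.strong_induction_on with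
  | _ y ih =>
    intro b a pows k hk
    rw [bitStep]
    by_cases h0 : y = 0
    · simp [h0]
    · have hlt : y >>> 1 < y := by simp [Nat.shiftRight_one]; omega
      simp only [h0, if_false]
      set pows' := if y &&& 1 = 1 then pows.set b (PySem.Int.mod ((pows.getD b 0) * 2) 1000000007) else pows with hc'
      have hk' : k < pows'.length := by
        rw [hc']; split <;> simp [hk]
      rw [ih _ hlt _ _ _ _ hk']
      have hbit : y &&& 1 = y % 2 := Nat.and_one_is_mod y
      have hdiv : y >>> 1 = y / 2 := Nat.shiftRight_one y
      rcases Nat.lt_trichotomy k b with hkb | hkb | hkb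
      · have h1 : ¬ (b ≤ k ∧ y.testBit (k - b)) := by omega
        have h2 : ¬ (b + 1 ≤ k ∧ (y >>> 1).testBit (k - (b + 1))) := by omega
        have h3 : pows'.getD k 0 = pows.getD k 0 := by
          rw [hc']; split
          · simp [List.getD_eq_getElem?_getD, List.getElem?_set_ne (by omega : b ≠ k)]
          · rfl
        rw [h3, if_neg h2, if_neg h1]
      · subst hkb
        have h2 : ¬ (k + 1 ≤ k ∧ (y >>> 1).testBit (k - (k + 1))) := by omega
        have htb : y.testBit (k - k) = decide (y % 2 = 1) := by
          simp [Nat.testBit_zero]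
        by_cases hb1 : y % 2 = 1
        · have h3 : pows'.getD k 0 = (pows.getD k 0 * 2) % 1000000007 := by
            rw [hc', hbit, if_pos hb1, List.getD_eq_getElem?_getD,
              List.getElem?_set_self (by omega), Option.getD_some, pmod]
          rw [h3, if_neg h2, htb, if_pos ⟨le_refl k, by simp [hb1]⟩, mul_one,
            Int.emod_emod_of_dvd _ dvd_rfl]
        · have h3 : pows'.getD k 0 = pows.getD k 0 := by
            rw [hc', hbit, if_neg hb1]
          rw [h3, if_neg h2, htb,
            if_neg (fun h => hb1 (by simpa using h.2))]
      · have h3 : pows'.getD k 0 = pows.getD k 0 := by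
          rw [hc']; split
          · simp [List.getD_eq_getElem?_getD, List.getElem?_set_ne (by omega : b ≠ k)]
          · rfl
        have hsplit : k - b = (k - (b + 1)) + 1 := by omega
        have htb : y.testBit (k - b) = (y >>> 1).testBit (k - (b + 1)) := by
          rw [hsplit, hdiv, Nat.testBit_succ]
        have hble : b ≤ k := by omega
        have hble' : b + 1 ≤ k := by omega
        rw [h3, htb]
        simp [hble, hble']

-- Effect of one `while y:` loop on the accumulator (mod p), plus a range fact.
theorem bitStep_fst : ∀ (y b : Nat) (a : Int) (pows : List Int),
    y < 2 ^ (pows.length - b) → b ≤ pows.length →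
    (bitStep y b a pows).1 % 1000000007
      = (a + ∑ k ∈ Finset.range pows.length,
          (if b ≤ k ∧ y.testBit (k - b) then pows.getD k 0 * 2 ^ k else 0)) % 1000000007
    ∧ ((bitStep y b a pows).1 = a ∨ (0 ≤ (bitStep y b a pows).1 ∧ (bitStep y b a pows).1 < 1000000007)) := by
  intro y
  induction y using Nat.strong_induction_on with
  | _ y ih =>
    intro b a pows hy hbL
    rw [bitStep]
    by_cases h0 : y = 0
    · simp [h0]
    · have hlt : y >>> 1 < y := by simp [Nat.shiftRight_one]; omega
      simp only [h0, if_false]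
      have hbL' : b < pows.length := by
        by_contra h
        have hb0 : pows.length - b = 0 := by omega
        rw [hb0, pow_zero] at hy
        omega
      have h2p : 2 ^ (pows.length - b) = 2 * 2 ^ (pows.length - (b + 1)) := by
        rw [← pow_succ']
        congr 1; omega
      set pows' := if y &&& 1 = 1 then pows.set b (PySem.Int.mod ((pows.getD b 0) * 2) 1000000007) else pows with hp'
      set a' := if y &&& 1 = 1 then PySem.Int.mod (a + ((pows.getD b 0) <<< b : Int)) 1000000007 else a with ha'
      have hlen' : pows'.length = pows.length := by rw [hp']; split <;> simp
      have hdiv : y >>> 1 = y / 2 := Nat.shiftRight_one y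
      have hy' : y >>> 1 < 2 ^ (pows'.length - (b + 1)) := by rw [hlen', hdiv]; omega
      obtain ⟨ihm, ihb⟩ := ih _ hlt (b + 1) a' pows' hy' (by omega : b + 1 ≤ pows'.length)
      rw [hlen'] at ihm
      have hg : ∀ k ∈ Finset.range pows.length,
          (if b + 1 ≤ k ∧ (y >>> 1).testBit (k - (b + 1)) then pows'.getD k 0 * 2 ^ k else 0)
            = (if b + 1 ≤ k ∧ (y >>> 1).testBit (k - (b + 1)) then pows.getD k 0 * 2 ^ k else 0) := by
        intro k _
        by_cases hc : b + 1 ≤ k ∧ (y >>> 1).testBit (k - (b + 1))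
        · have hne : b ≠ k := by omega
          have hgd : pows'.getD k 0 = pows.getD k 0 := by
            rw [hp']; split
            · simp [List.getD_eq_getElem?_getD, List.getElem?_set_ne hne]
            · rfl
          rw [if_pos hc, if_pos hc, hgd]
        · rw [if_neg hc, if_neg hc]
      have e2 : ∑ k ∈ (Finset.range pows.length).erase b,
          (if b + 1 ≤ k ∧ (y >>> 1).testBit (k - (b + 1)) then pows.getD k 0 * 2 ^ k else 0)
          = ∑ k ∈ (Finset.range pows.length).erase b,
          (if b ≤ k ∧ y.testBit (k - b) then pows.getD k 0 * 2 ^ k else 0) := by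
        refine Finset.sum_congr rfl ?_
        intro k hk
        have hne : k ≠ b := (Finset.mem_erase.mp hk).1
        have hiff : (b + 1 ≤ k ∧ (y >>> 1).testBit (k - (b + 1))) ↔ (b ≤ k ∧ y.testBit (k - b)) := by
          constructor
          · rintro ⟨h1, h2⟩
            refine ⟨by omega, ?_⟩
            have : k - b = (k - (b + 1)) + 1 := by omega
            rw [this, Nat.testBit_succ, ← hdiv]
            exact h2
          · rintro ⟨h1, h2⟩
            have hbk : b + 1 ≤ k := by omega
            refine ⟨hbk, ?_⟩
            rw [hdiv, ← Nat.testBit_succ]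
            have heq : (k - (b + 1)).succ = k - b := by omega
            rw [heq]
            exact h2
        by_cases hc : b ≤ k ∧ y.testBit (k - b)
        · rw [if_pos (hiff.mpr hc), if_pos hc]
        · rw [if_neg (fun h => hc (hiff.mp h)), if_neg hc]
      have e1 : ∑ k ∈ Finset.range pows.length,
          (if b + 1 ≤ k ∧ (y >>> 1).testBit (k - (b + 1)) then pows.getD k 0 * 2 ^ k else 0)
          = ∑ k ∈ (Finset.range pows.length).erase b,
          (if b + 1 ≤ k ∧ (y >>> 1).testBit (k - (b + 1)) then pows.getD k 0 * 2 ^ k else 0) :=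
        (Finset.sum_erase _ (by simp)).symm
      have e3 : ∑ k ∈ Finset.range pows.length,
          (if b ≤ k ∧ y.testBit (k - b) then pows.getD k 0 * 2 ^ k else 0)
          = (if b ≤ b ∧ y.testBit (b - b) then pows.getD b 0 * 2 ^ b else 0)
            + ∑ k ∈ (Finset.range pows.length).erase b,
            (if b ≤ k ∧ y.testBit (k - b) then pows.getD k 0 * 2 ^ k else 0) :=
        (Finset.add_sum_erase _ _ (Finset.mem_range.mpr hbL')).symm
      have hbit : y &&& 1 = y % 2 := Nat.and_one_is_mod y
      have htb : y.testBit (b - b) = decide (y % 2 = 1) := by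
        simp [Nat.testBit_zero]
      constructor
      · rw [ihm, Finset.sum_congr rfl hg, e1, e2]
        by_cases hb1 : y &&& 1 = 1
        · have ha2 : a' = (a + pows.getD b 0 * 2 ^ b) % 1000000007 := by
            rw [ha', if_pos hb1, pmod, Int.shiftLeft_eq]
          rw [ha2, Int.add_emod, Int.emod_emod_of_dvd _ dvd_rfl, ← Int.add_emod]
          refine congrArg (· % 1000000007) ?_
          rw [e3, htb, if_pos ⟨le_refl b, by simp [hbit ▸ hb1]⟩]
          ring
        · have ha2 : a' = a := by rw [ha', if_neg hb1]
          rw [ha2]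
          refine congrArg (· % 1000000007) ?_
          rw [e3, htb, if_neg (fun h => hb1 (by rw [hbit]; simpa using h.2))]
          ring
      · rcases ihb with h | h
        · rw [h, ha']
          by_cases hb1 : y &&& 1 = 1
          · rw [if_pos hb1, pmod]
            exact Or.inr ⟨Int.emod_nonneg _ (by norm_num), Int.emod_lt_of_pos _ (by norm_num)⟩
          · rw [if_neg hb1]
            exact Or.inl rfl
        · exact Or.inr h

-- Complement-within-k-bits flips every bit below k.
theorem compl_testBit : ∀ (i k r : Nat), i < k → r < 2 ^ k →
    (2 ^ k - 1 - r).testBit i = ! r.testBit i := by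
  intro i
  induction i with
  | zero =>
      intro k r hik hr
      have hk : 2 ^ k = 2 * 2 ^ (k - 1) := by
        rw [← pow_succ']; congr 1; omega
      simp only [Nat.testBit_zero]
      rcases Nat.mod_two_eq_zero_or_one r with h | h
      · have : (2 ^ k - 1 - r) % 2 = 1 := by omega
        simp [this, h]
      · have : (2 ^ k - 1 - r) % 2 = 0 := by omega
        simp [this, h]
  | succ i ih =>
      intro k r hik hr
      have hk : 2 ^ k = 2 * 2 ^ (k - 1) := by
        rw [← pow_succ']; congr 1; omega
      have hdiv : (2 ^ k - 1 - r) / 2 = 2 ^ (k - 1) - 1 - r / 2 := by omega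
      rw [Nat.testBit_succ, Nat.testBit_succ, hdiv]
      exact ih (k - 1) (r / 2) (by omega) (by omega)

-- `x & (1 << i)` is nonzero iff bit i of `x & 0xFFFFFFFF` is set (i < 32), for every int x.
theorem band_two_pow_iff (x : Int) (i : Nat) (hi : i < 32) :
    (PySem.Int.band x ((2 ^ i : Nat) : Int) ≠ 0)
      ↔ (PySem.Int.band x 0xFFFFFFFF).toNat.testBit i := by
  have hmask : (0xFFFFFFFF : Int) = ((2 ^ 32 - 1 : Nat) : Int) := by norm_num
  rw [hmask]
  by_cases hx : 0 ≤ x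
  · rw [PySem.Int.band_of_nonneg hx (by positivity),
        PySem.Int.band_of_nonneg hx (by positivity)]
    simp only [Int.toNat_natCast]
    rw [Nat.and_two_pow, Nat.and_two_pow_sub_one_eq_mod, Nat.testBit_mod_two_pow]
    by_cases hb : x.toNat.testBit i <;> simp [hb, hi]
  · have hx' : ¬ (0 ≤ x) := hx
    simp only [PySem.Int.band, hx', if_false,
      (by positivity : (0:Int) ≤ ((2 ^ i : Nat) : Int)),
      (by positivity : (0:Int) ≤ ((2 ^ 32 - 1 : Nat) : Int)), if_true,
      Int.toNat_natCast]
    set m := (-x - 1).toNat with hm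
    have h1 : 2 ^ i &&& m = (m.testBit i).toNat * 2 ^ i := by
      rw [Nat.land_comm, Nat.and_two_pow]
    have h2 : 2 ^ 32 - 1 &&& m = m % 2 ^ 32 := by
      rw [Nat.land_comm, Nat.and_two_pow_sub_one_eq_mod]
    rw [h1, h2]
    have hr : m % 2 ^ 32 < 2 ^ 32 := Nat.mod_lt _ (by norm_num)
    rw [compl_testBit i 32 (m % 2 ^ 32) hi hr, Nat.testBit_mod_two_pow]
    by_cases hb : m.testBit i <;> simp [hb, hi]

-- The masked value is a 32-bit Nat.
theorem band_mask_lt (x : Int) : (PySem.Int.band x 0xFFFFFFFF).toNat < 2 ^ 32 := by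
  have hmask : (0xFFFFFFFF : Int) = ((2 ^ 32 - 1 : Nat) : Int) := by norm_num
  rw [hmask]
  by_cases hx : 0 ≤ x
  · rw [PySem.Int.band_of_nonneg hx (by positivity)]
    simp only [Int.toNat_natCast]
    rw [Nat.and_two_pow_sub_one_eq_mod]
    omega
  · simp only [PySem.Int.band, hx, if_false,
      (by positivity : (0:Int) ≤ ((2 ^ 32 - 1 : Nat) : Int)), if_true,
      Int.toNat_natCast]
    rw [Nat.land_comm, Nat.and_two_pow_sub_one_eq_mod]
    have : (-x - 1).toNat % 2 ^ 32 < 2 ^ 32 := Nat.mod_lt _ (by norm_num)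
    omega

-- One-pass fold invariant: each power-table entry is congruent mod p to 2^count and the
-- accumulator to the closed-form sum for the prefix processed so far (and stays in range).
theorem foldB_state (arr : List Int) : ∀ (l : List Int) (a : Int) (pows : List Int),
    pows.length = 32 →
    (∀ k, k < 32 →
      (l.foldl (fun st j =>
          bitStep (PySem.Int.band (PySem.List.pyGetD arr j 0) 0xFFFFFFFF).toNat 0 st.1 st.2)
        (a, pows)).2.getD k 0 % 1000000007
        = (pows.getD k 0
          * 2 ^ (l.countP (fun j => (PySem.Int.band (PySem.List.pyGetD arr j 0) 0xFFFFFFFF).toNat.testBit k))) % 1000000007)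
    ∧ (l.foldl (fun st j =>
          bitStep (PySem.Int.band (PySem.List.pyGetD arr j 0) 0xFFFFFFFF).toNat 0 st.1 st.2)
        (a, pows)).1 % 1000000007
      = (a + ∑ k ∈ Finset.range 32,
          pows.getD k 0
          * ((2:Int) ^ (l.countP (fun j => (PySem.Int.band (PySem.List.pyGetD arr j 0) 0xFFFFFFFF).toNat.testBit k)) - 1)
          * 2 ^ k) % 1000000007
    ∧ ((l.foldl (fun st j =>
          bitStep (PySem.Int.band (PySem.List.pyGetD arr j 0) 0xFFFFFFFF).toNat 0 st.1 st.2)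
        (a, pows)).1 = a
       ∨ (0 ≤ (l.foldl (fun st j =>
          bitStep (PySem.Int.band (PySem.List.pyGetD arr j 0) 0xFFFFFFFF).toNat 0 st.1 st.2)
        (a, pows)).1
          ∧ (l.foldl (fun st j =>
          bitStep (PySem.Int.band (PySem.List.pyGetD arr j 0) 0xFFFFFFFF).toNat 0 st.1 st.2)
        (a, pows)).1 < 1000000007)) := by
  intro l
  induction l with
  | nil =>
      intro a pows hlen
      refine ⟨?_, ?_, Or.inl rfl⟩
      · intro k hk; simp
      · simp
  | cons x l ih =>
      intro a pows hlen
      simp only [List.foldl_cons, List.countP_cons]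
      set fx := (PySem.Int.band (PySem.List.pyGetD arr x 0) 0xFFFFFFFF).toNat with hfxdef
      have hfx32 : fx < 2 ^ 32 := band_mask_lt _
      have hlen1 : (bitStep fx 0 a pows).2.length = 32 := by rw [bitStep_length, hlen]
      obtain ⟨ih1, ih2, ih3⟩ := ih (bitStep fx 0 a pows).1 (bitStep fx 0 a pows).2 hlen1
      obtain ⟨hfm, hfb⟩ := bitStep_fst fx 0 a pows (by rw [hlen]; simpa using hfx32) (by omega)
      refine ⟨?_, ?_, ?_⟩
      · intro k hk
        rw [ih1 k hk, Int.mul_emod, bitStep_snd_getD _ _ _ _ _ (by rw [hlen]; exact hk), ← Int.mul_emod]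
        simp only [Nat.zero_le, true_and, Nat.sub_zero]
        refine congrArg (· % 1000000007) ?_
        by_cases hb : fx.testBit k
        · simp only [hb, if_pos, pow_add, pow_one]
          ring
        · simp [hb]
      · rw [ih2, Int.add_emod, hfm, Finset.sum_int_mod]
        have hterm : ∀ k ∈ Finset.range 32,
            ((bitStep fx 0 a pows).2.getD k 0
              * ((2:Int) ^ (l.countP (fun j => (PySem.Int.band (PySem.List.pyGetD arr j 0) 0xFFFFFFFF).toNat.testBit k)) - 1)
              * 2 ^ k) % 1000000007
            = ((pows.getD k 0 * (if fx.testBit k then 2 else 1))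
              * ((2:Int) ^ (l.countP (fun j => (PySem.Int.band (PySem.List.pyGetD arr j 0) 0xFFFFFFFF).toNat.testBit k)) - 1)
              * 2 ^ k) % 1000000007 := by
          intro k hk
          rw [mul_assoc, mul_assoc]
          refine hswap _ _ _ ?_
          have := bitStep_snd_getD fx 0 a pows k (by rw [hlen]; exact Finset.mem_range.mp hk)
          simpa using this
        rw [Finset.sum_congr rfl hterm, ← Finset.sum_int_mod, ← Int.add_emod]
        simp only [Nat.zero_le, true_and, Nat.sub_zero, hlen]
        refine congrArg (· % 1000000007) ?_
        rw [add_assoc, ← Finset.sum_add_distrib]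
        congr 1
        refine Finset.sum_congr rfl ?_
        intro k _
        by_cases hb : fx.testBit k
        · simp only [hb, if_pos, pow_add, pow_one]
          ring
        · simp only [hb, Bool.false_eq_true, if_false]
          ring
      · rcases ih3 with h | h
        · rw [h]
          rcases hfb with h' | h'
          · exact Or.inl h'
          · exact Or.inr h'
        · exact Or.inr h

theorem replicate_getD (k : Nat) : (List.replicate 32 (1:Int)).getD k 0 = if k < 32 then 1 else 0 := by
  rw [List.getD_eq_getElem?_getD, List.getElem?_replicate]
  by_cases h : k < 32 <;> simp [h]

-- List-sum over range 32 (what A's foldl produces) equals the Finset sum.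
theorem sum_map_range_eq (f : Nat → Int) : ∀ (m : Nat),
    ((List.range m).map f).sum = ∑ k ∈ Finset.range m, f k := by
  intro m
  induction m with
  | zero => simp
  | succ m ih => rw [List.range_succ, Finset.sum_range_succ]; simp [ih]

-- Python's `1 << m` (m = a nonnegative int) as a cast Nat power.
theorem pvShift (m : Nat) : (1:Int) <<< (m : Int) = ((2 ^ m : Nat) : Int) := by
  rw [Int.shiftLeft_natCast_right, Int.shiftLeft_eq]
  push_cast
  ring

-- ===== VERDICT (by name: the statement is the Claim_ definition above) =====
theorem check_spec : Claim_equal_check := by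
  intro arr n _ _
  unfold Spec_check check check_alt
  obtain ⟨_, hB, hBb⟩ := foldB_state arr (PySem.List.pyRange 0 n) 0 (List.replicate 32 1) (by simp)
  have hBred : (((PySem.List.pyRange 0 n).foldl (fun st j =>
      bitStep (PySem.Int.band (PySem.List.pyGetD arr j 0) 0xFFFFFFFF).toNat 0 st.1 st.2)
      (0, List.replicate 32 1)).1) % 1000000007
      = ((PySem.List.pyRange 0 n).foldl (fun st j =>
      bitStep (PySem.Int.band (PySem.List.pyGetD arr j 0) 0xFFFFFFFF).toNat 0 st.1 st.2)
      (0, List.replicate 32 1)).1 := by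
    rcases hBb with h | h
    · rw [h]; rfl
    · exact Int.emod_emod_of_dvd _ dvd_rfl ▸ Int.emod_eq_of_lt h.1 h.2
  rw [pmod]
  conv_rhs => rw [← hBred]
  rw [hB, zero_add]
  refine congrArg (· % 1000000007) ?_
  refine (PySem.List.foldl_add (PySem.List.pyRange 0 32) _ 0).trans ?_
  rw [zero_add, PySem.List.pyRange_one 0 32, (by decide : ((32:Int) - 0).toNat = 32),
    List.map_map, sum_map_range_eq]
  refine Finset.sum_congr rfl ?_
  intro k hk
  have hk32 : k < 32 := Finset.mem_range.mp hk
  simp only [Function.comp_apply]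
  rw [foldA_countP arr _ (PySem.List.pyRange 0 n) 0, zero_add]
  simp only [zero_add, Int.toNat_natCast, pvShift, Int.shiftLeft_eq, one_mul]
  have hcnt : (PySem.List.pyRange 0 n).countP
        (fun j => decide (PySem.Int.band (PySem.List.pyGetD arr j 0) (((2:Nat) ^ k : Nat) : Int) ≠ 0))
      = (PySem.List.pyRange 0 n).countP
        (fun j => (PySem.Int.band (PySem.List.pyGetD arr j 0) 0xFFFFFFFF).toNat.testBit k) := by
    refine List.countP_congr ?_
    intro j _
    have h := band_two_pow_iff (PySem.List.pyGetD arr j 0) k hk32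
    push_cast at h ⊢
    simpa using h
  rw [hcnt, replicate_getD, if_pos hk32]
  push_cast
  ring
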